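-- pv_equiv track=rewrite | github.com/estebancarlin/AlternanceRecherche-WorkStudy- | AlternanceCode/src/utils.py | make_groups
-- ===== SOURCE A (Python) =====
-- def make_groups(names):
--     idx = range(len(names))
--     return (
--         [i for i in idx if 'loss' in names[i]],
--         [i for i in idx if 'acc' in names[i] and 'loss' not in names[i]],
--         [i for i in idx if 'iou' in names[i] and 'loss' not in names[i]],
--         [i for i in idx if 'entropy' in names[i] and 'loss' not in names[i]]
--     )
-- ===== SOURCE B (Python) =====
-- def make_groups(names):
--     loss, acc, iou, entropy = [], [], [], []
--     for i, name in enumerate(names):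
--         if 'loss' in name:
--             loss.append(i)
--         else:
--             if 'acc' in name:
--                 acc.append(i)
--             if 'iou' in name:
--                 iou.append(i)
--             if 'entropy' in name:
--                 entropy.append(i)
--     return loss, acc, iou, entropy
-- ===== Notes on version B (the rewrite author's own statement) =====
-- stated objective: faster
-- what changed: Replaces four separate comprehension scans over the index range (each re-testing the 'loss' membership) with a single enumerate pass maintaining four accumulator lists, gating the three non-loss checks behind one 'loss' test.
import Mathlib
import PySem

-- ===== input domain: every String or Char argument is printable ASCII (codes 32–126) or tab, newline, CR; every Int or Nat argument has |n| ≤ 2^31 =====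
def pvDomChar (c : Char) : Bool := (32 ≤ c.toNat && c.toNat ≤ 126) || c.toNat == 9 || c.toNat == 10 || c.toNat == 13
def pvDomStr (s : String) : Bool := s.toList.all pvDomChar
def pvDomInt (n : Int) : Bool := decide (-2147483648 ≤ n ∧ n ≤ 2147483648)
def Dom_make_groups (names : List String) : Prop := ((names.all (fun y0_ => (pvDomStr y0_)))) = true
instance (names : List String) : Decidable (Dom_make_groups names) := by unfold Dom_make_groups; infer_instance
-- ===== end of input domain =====

-- B replaces A's four comprehension scans with one enumerate pass keeping four accumulators (objective: faster, constant factor).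

-- ===== PORT A =====
def make_groups (names : List String) : List Int × List Int × List Int × List Int :=
  let idx := PySem.List.pyRange 0 (names.length : Int) 1
  ( idx.filter (fun i => PySem.Str.isIn "loss" (PySem.List.pyGetD names i "")),
    idx.filter (fun i => PySem.Str.isIn "acc" (PySem.List.pyGetD names i "") &&
                         !PySem.Str.isIn "loss" (PySem.List.pyGetD names i "")),
    idx.filter (fun i => PySem.Str.isIn "iou" (PySem.List.pyGetD names i "") &&
                         !PySem.Str.isIn "loss" (PySem.List.pyGetD names i "")),
    idx.filter (fun i => PySem.Str.isIn "entropy" (PySem.List.pyGetD names i "") &&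
                         !PySem.Str.isIn "loss" (PySem.List.pyGetD names i "")) )

-- ===== PORT B =====
-- the loop body of Source B: one (index, name) pair updates the four accumulators
def bStep (st : List Int × List Int × List Int × List Int) (p : Int × String) :
    List Int × List Int × List Int × List Int :=
  let (l, a, u, e) := st
  let (i, name) := p
  if PySem.Str.isIn "loss" name then
    (l ++ [i], a, u, e)
  else
    (l,
     if PySem.Str.isIn "acc" name then a ++ [i] else a,
     if PySem.Str.isIn "iou" name then u ++ [i] else u,
     if PySem.Str.isIn "entropy" name then e ++ [i] else e)

def make_groups_alt (names : List String) : List Int × List Int × List Int × List Int :=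
  (PySem.List.enumerate names 0).foldl bStep ([], [], [], [])

-- ===== PRECONDITION & SPEC =====
def Spec_make_groups (names : List String) (out : List Int × List Int × List Int × List Int) : Prop := out = make_groups_alt names
instance (names : List String) (out : List Int × List Int × List Int × List Int) : Decidable (Spec_make_groups names out) := by unfold Spec_make_groups; infer_instance

-- ===== CLAIM (what is proved, stated in full; the proofs are below) =====
def Claim_equal_make_groups : Prop := ∀ (names : List String), Dom_make_groups names → Spec_make_groups names (make_groups names)

-- ===== LEMMAS AND PROOFS =====

-- the fold over (j, g j) pairs accumulates exactly A's four filters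
theorem bStep_foldl (g : Int → String) (l L A U E : List Int) :
    (l.map (fun j => (j, g j))).foldl bStep (L, A, U, E) =
      (L ++ l.filter (fun j => PySem.Str.isIn "loss" (g j)),
       A ++ l.filter (fun j => PySem.Str.isIn "acc" (g j) && !PySem.Str.isIn "loss" (g j)),
       U ++ l.filter (fun j => PySem.Str.isIn "iou" (g j) && !PySem.Str.isIn "loss" (g j)),
       E ++ l.filter (fun j => PySem.Str.isIn "entropy" (g j) && !PySem.Str.isIn "loss" (g j))) := by
  induction l generalizing L A U E with
  | nil => simp
  | cons j t ih =>
    simp only [List.map_cons, List.foldl_cons, List.filter_cons, bStep,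
      PySem.Str.isIn_eq]
    by_cases hl : PySem.Chars.isIn ['l','o','s','s'] (g j).toList = true
    · simp [hl, ih]
    · simp only [Bool.not_eq_true] at hl
      by_cases ha : PySem.Chars.isIn ['a','c','c'] (g j).toList = true <;>
      by_cases hu : PySem.Chars.isIn ['i','o','u'] (g j).toList = true <;>
      by_cases he : PySem.Chars.isIn ['e','n','t','r','o','p','y'] (g j).toList = true <;>
        simp [hl, ha, hu, he, ih]

-- ===== VERDICT (by name: the statement is the Claim_ definition above) =====
theorem make_groups_spec : Claim_equal_make_groups := by
  intro names _
  unfold Spec_make_groups make_groups make_groups_alt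
  rw [PySem.List.enumerate_eq_map_pyRange (d := "")]
  rw [bStep_foldl]
  simp
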